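-- pv_equiv track=rewrite | github.com/m-webster/CSSLO | rainbow_codes/flag_codes.py | inducedCycles
-- ===== SOURCE A (Python) =====
-- def path2cycle(p1,p2):
--     '''form a cycle from path up to i, joined to p[-1] via the path p'''
--     ## find first place where p1 and p2 vary, going from L to R (avoid subcycles)
--     n = min(len(p1),len(p2))
--     i = 0
--     while i < n and p1[i] == p2[i]:
--         i+=1
--     ## join the paths to form a cycle
--     temp = list(p1[i:])  + list(reversed(p2[i:]))
--     return temp
--
-- def getPath(parentTree,i,edgewise=True):
--     '''Return path of flags visited to reach flag i'''
--     temp = []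
--     while parentTree[i] is not None:
--         j,e = parentTree[i]
--         if edgewise:
--             temp.extend([e[1],e[0]])
--         else:
--             temp.append(j)
--         i = j
--     temp.reverse()
--     return temp
--
-- def inducedCycles(parentTree, cycles):
--     '''generating set of cycles for connected component corresponding to parentTree'''
--     temp = []
--     for (i,j),eList in cycles.items():
--         p1 = getPath(parentTree,i)
--         p2 = getPath(parentTree,j)
--         c = path2cycle(p1,p2)
--         for e in eList:
--             temp.append(list(c) + list(e))
--     return {tuple(c) for c in temp}
-- ===== SOURCE B (Python) =====
-- def inducedCycles(parentTree, cycles):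
--     '''generating set of cycles for connected component corresponding to parentTree'''
--     out = set()
--     for (i, j), eList in cycles.items():
--         t1 = _rootPath(parentTree, i)
--         t2 = _rootPath(parentTree, j)
--         # peel the common prefix of the two root paths
--         while t1 and t2 and t1[0] == t2[0]:
--             t1 = t1[1:]
--             t2 = t2[1:]
--         c = tuple(t1) + tuple(reversed(t2))
--         for e in eList:
--             out.add(c + tuple(e))
--     return out
--
-- def _rootPath(parentTree, i):
--     '''edges on the walk from i up to the root, flattened in root-to-leaf order'''
--     edges = []
--     while parentTree[i] is not None:
--         i, e = parentTree[i]
--         edges.append(e)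
--     path = []
--     for e in reversed(edges):
--         path.append(e[0])
--         path.append(e[1])
--     return path
-- ===== Notes on version B (the rewrite author's own statement) =====
-- stated objective: alternative
-- what changed: B builds each root path by collecting raw edge chunks and flattening them in reversed chunk order (no reverse of the flat path), peels the common prefix of the two paths by structural head-dropping instead of A's index scan with min(len), and accumulates the result set incrementally instead of building a list and a set comprehension at the end.
import Mathlib
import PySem

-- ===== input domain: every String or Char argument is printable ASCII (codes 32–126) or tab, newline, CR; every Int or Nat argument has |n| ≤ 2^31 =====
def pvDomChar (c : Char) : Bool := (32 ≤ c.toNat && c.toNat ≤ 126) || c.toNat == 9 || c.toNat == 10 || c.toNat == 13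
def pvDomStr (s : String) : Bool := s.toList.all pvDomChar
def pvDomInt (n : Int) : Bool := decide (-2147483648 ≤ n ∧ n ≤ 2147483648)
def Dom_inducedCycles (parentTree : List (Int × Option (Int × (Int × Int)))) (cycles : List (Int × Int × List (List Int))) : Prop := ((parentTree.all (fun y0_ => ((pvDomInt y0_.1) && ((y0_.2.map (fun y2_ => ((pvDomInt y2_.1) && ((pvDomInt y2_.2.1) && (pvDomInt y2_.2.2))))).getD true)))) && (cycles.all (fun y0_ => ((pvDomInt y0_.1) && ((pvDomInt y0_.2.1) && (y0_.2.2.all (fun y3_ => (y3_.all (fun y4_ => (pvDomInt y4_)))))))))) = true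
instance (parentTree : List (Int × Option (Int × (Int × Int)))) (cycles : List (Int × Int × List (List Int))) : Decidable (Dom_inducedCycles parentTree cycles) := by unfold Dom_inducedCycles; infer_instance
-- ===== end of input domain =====

-- B folds root paths from edge chunks (no list reverse of the flat path) and peels the common
-- prefix structurally instead of A's index scan; alternative decomposition, same cost.


-- ===== PORT A =====
-- getPath's while loop; fuel = parentTree.length + 1: with distinct keys a terminating walk
-- visits distinct keys, so it makes at most parentTree.length steps and fuel never runs out
-- inside Pre_. A missing key is Python's KeyError (excluded by Pre_); the loop stops there
-- for totality.
def getPathLoop (pt : List (Int × Option (Int × (Int × Int)))) : Nat → Int → List Int → List Int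
  | 0, _, temp => temp
  | fuel+1, i, temp =>
    match pt.lookup i with
    | some (some (j, e)) => getPathLoop pt fuel j (temp ++ [e.2, e.1])
    | _ => temp

def getPathA (pt : List (Int × Option (Int × (Int × Int)))) (i : Int) : List Int :=
  (getPathLoop pt (pt.length + 1) i []).reverse

-- path2cycle's index scan: while i < n and p1[i] == p2[i]: i += 1 (fuel = n bounds the i counter;
-- getD is exact because the guard keeps i < n ≤ both lengths)
def divLoop (p1 p2 : List Int) (n : Nat) : Nat → Nat → Nat
  | 0, i => i
  | fuel+1, i => if i < n ∧ p1.getD i 0 = p2.getD i 0 then divLoop p1 p2 n fuel (i+1) else i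

-- p1[i:] with 0 ≤ i is List.drop
def path2cycleA (p1 p2 : List Int) : List Int :=
  let n := min p1.length p2.length
  let k := divLoop p1 p2 n n 0
  p1.drop k ++ (p2.drop k).reverse

def inducedCycles (parentTree : List (Int × Option (Int × (Int × Int)))) (cycles : List (Int × Int × List (List Int))) : List (List Int) :=
  PySem.Set.ofList (cycles.foldl (fun temp c =>
    let p1 := getPathA parentTree c.1
    let p2 := getPathA parentTree c.2.1
    let cc := path2cycleA p1 p2
    temp ++ c.2.2.map (fun e => cc ++ e)) [])

-- ===== PORT B =====
-- _rootPath's first loop: collect the raw edge chunks leaf-to-root (same fuel rationale as A's walk)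
def walkEdges (pt : List (Int × Option (Int × (Int × Int)))) : Nat → Int → List (Int × Int) → List (Int × Int)
  | 0, _, es => es
  | fuel+1, i, es =>
    match pt.lookup i with
    | some (some (j, e)) => walkEdges pt fuel j (es ++ [e])
    | _ => es

-- _rootPath's second loop: for e in reversed(edges): path += [e[0], e[1]]
def rootPathB (pt : List (Int × Option (Int × (Int × Int)))) (i : Int) : List Int :=
  (walkEdges pt (pt.length + 1) i []).reverse.foldl (fun path e => path ++ [e.1, e.2]) []

-- B's peeling loop: while t1 and t2 and t1[0] == t2[0]: drop both heads
def dropCommon : List Int → List Int → List Int × List Int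
  | a :: t1, b :: t2 => if a = b then dropCommon t1 t2 else (a :: t1, b :: t2)
  | t1, t2 => (t1, t2)

def inducedCycles_alt (parentTree : List (Int × Option (Int × (Int × Int)))) (cycles : List (Int × Int × List (List Int))) : List (List Int) :=
  cycles.foldl (fun out c =>
    let p := dropCommon (rootPathB parentTree c.1) (rootPathB parentTree c.2.1)
    let cc := p.1 ++ p.2.reverse
    c.2.2.foldl (fun o e => PySem.Set.add o (cc ++ e)) out) PySem.Set.empty

-- ===== PRECONDITION & SPEC =====
-- 'the parent walk from i returns normally': following parent links from i reaches a key whose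
-- entry is none (the root) within parentTree.length links. With distinct keys this is EXACTLY
-- A's domain for an endpoint: a walk that meets a missing key raises KeyError, and one that
-- never reaches a root entry revisits a key and loops FOREVER (A never returns). It checks
-- root-reachability only; it computes no path and no output.
def hitsRoot (pt : List (Int × Option (Int × (Int × Int)))) : Nat → Int → Bool
  | 0, i => pt.lookup i == some none
  | fuel+1, i =>
    match pt.lookup i with
    | some (some (j, _)) => hitsRoot pt fuel j
    | some none => true
    | none => false

-- Pre_ excludes only: duplicate keys in either dict (a Python dict cannot hold them; the
-- association lists would misrepresent it), and cycle endpoints whose parent walk raises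
-- KeyError or never terminates (A returns no value on either).
def Pre_inducedCycles (parentTree : List (Int × Option (Int × (Int × Int)))) (cycles : List (Int × Int × List (List Int))) : Prop :=
  (parentTree.map Prod.fst).Nodup ∧
  (cycles.map (fun c => (c.1, c.2.1))).Nodup ∧
  ∀ c ∈ cycles, hitsRoot parentTree parentTree.length c.1 = true ∧
                hitsRoot parentTree parentTree.length c.2.1 = true

instance (parentTree : List (Int × Option (Int × (Int × Int)))) (cycles : List (Int × Int × List (List Int))) : Decidable (Pre_inducedCycles parentTree cycles) := by unfold Pre_inducedCycles; infer_instance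

def pvWitness_inducedCycles : (List (Int × Option (Int × (Int × Int)))) × (List (Int × Int × List (List Int))) :=
  ([(0, none), (1, some (0, (10, 11))), (2, some (0, (20, 21)))], [(1, (2, [[7, 8]]))])

def Spec_inducedCycles (parentTree : List (Int × Option (Int × (Int × Int)))) (cycles : List (Int × Int × List (List Int))) (out : List (List Int)) : Prop := out = inducedCycles_alt parentTree cycles
instance (parentTree : List (Int × Option (Int × (Int × Int)))) (cycles : List (Int × Int × List (List Int))) (out : List (List Int)) : Decidable (Spec_inducedCycles parentTree cycles out) := by unfold Spec_inducedCycles; infer_instance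

-- ===== CLAIM (what is proved, stated in full; the proofs are below) =====
def Claim_equal_inducedCycles : Prop := ∀ (parentTree : List (Int × Option (Int × (Int × Int)))) (cycles : List (Int × Int × List (List Int))), Dom_inducedCycles parentTree cycles → Pre_inducedCycles parentTree cycles → Spec_inducedCycles parentTree cycles (inducedCycles parentTree cycles)

-- ===== LEMMAS AND PROOFS =====

-- the flat edgewise list A's walk accumulates, expressed over B's edge chunks
def flatBA (es : List (Int × Int)) : List Int := es.flatMap (fun e => [e.2, e.1])

lemma walk_flat (pt : List (Int × Option (Int × (Int × Int)))) :
    ∀ (fuel : Nat) (i : Int) (es : List (Int × Int)),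
      getPathLoop pt fuel i (flatBA es) = flatBA (walkEdges pt fuel i es) := by
  intro fuel
  induction fuel with
  | zero => intro i es; rfl
  | succ f ih =>
    intro i es
    simp only [getPathLoop, walkEdges]
    cases h : pt.lookup i with
    | none => rfl
    | some v =>
      cases v with
      | none => rfl
      | some je =>
        obtain ⟨j, e⟩ := je
        have hfl : flatBA es ++ [e.2, e.1] = flatBA (es ++ [e]) := by
          simp [flatBA]
        show getPathLoop pt f j (flatBA es ++ [e.2, e.1]) = flatBA (walkEdges pt f j (es ++ [e]))
        rw [hfl, ih]

lemma flatBA_reverse (l : List (Int × Int)) :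
    (flatBA l).reverse = l.reverse.flatMap (fun e => [e.1, e.2]) := by
  induction l with
  | nil => rfl
  | cons e t ih => simp [flatBA] at ih ⊢; simp [ih]

lemma rootPathB_eq (pt : List (Int × Option (Int × (Int × Int)))) (i : Int) :
    rootPathB pt i = getPathA pt i := by
  unfold rootPathB getPathA
  have h := walk_flat pt (pt.length + 1) i []
  simp only [flatBA, List.flatMap_nil] at h
  rw [h, PySem.List.foldl_append_eq_flatMap]
  have h2 := flatBA_reverse (walkEdges pt (pt.length + 1) i [])
  simp only [flatBA] at h2
  simp [← h2]

-- common prefix length of two lists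
def cpl : List Int → List Int → Nat
  | a :: t1, b :: t2 => if a = b then cpl t1 t2 + 1 else 0
  | _, _ => 0

lemma dropCommon_eq (p1 p2 : List Int) :
    dropCommon p1 p2 = (p1.drop (cpl p1 p2), p2.drop (cpl p1 p2)) := by
  induction p1 generalizing p2 with
  | nil => cases p2 <;> rfl
  | cons a t1 ih =>
    cases p2 with
    | nil => rfl
    | cons b t2 =>
      by_cases hab : a = b
      · simp [dropCommon, cpl, hab, ih]
      · simp [dropCommon, cpl, hab]

lemma divLoop_eq (p1 p2 : List Int) :
    ∀ (fuel i : Nat), min p1.length p2.length ≤ i + fuel →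
      divLoop p1 p2 (min p1.length p2.length) fuel i = i + cpl (p1.drop i) (p2.drop i) := by
  intro fuel
  induction fuel with
  | zero =>
    intro i hle
    have : p1.length ≤ i ∨ p2.length ≤ i := by omega
    rcases this with h | h
    · rw [List.drop_eq_nil_of_le h]; simp [divLoop, cpl]
    · rw [show p2.drop i = ([] : List Int) from List.drop_eq_nil_of_le h]
      cases p1.drop i <;> simp [divLoop, cpl]
  | succ f ih =>
    intro i hle
    simp only [divLoop]
    by_cases hi : i < min p1.length p2.length
    · have h1 : i < p1.length := lt_of_lt_of_le hi (min_le_left _ _)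
      have h2 : i < p2.length := lt_of_lt_of_le hi (min_le_right _ _)
      have d1 : p1.drop i = p1[i] :: p1.drop (i+1) := List.drop_eq_getElem_cons h1
      have d2 : p2.drop i = p2[i] :: p2.drop (i+1) := List.drop_eq_getElem_cons h2
      by_cases heq : p1.getD i 0 = p2.getD i 0
      · rw [if_pos ⟨hi, heq⟩, ih (i+1) (by omega)]
        rw [List.getD_eq_getElem _ _ h1, List.getD_eq_getElem _ _ h2] at heq
        rw [d1, d2]
        simp [cpl, heq]
        omega
      · rw [if_neg (by tauto)]
        rw [List.getD_eq_getElem _ _ h1, List.getD_eq_getElem _ _ h2] at heq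
        rw [d1, d2]
        simp [cpl, heq]
    · rw [if_neg (by tauto)]
      have : p1.length ≤ i ∨ p2.length ≤ i := by omega
      rcases this with h | h
      · rw [List.drop_eq_nil_of_le h]; simp [cpl]
      · rw [show p2.drop i = ([] : List Int) from List.drop_eq_nil_of_le h]
        cases p1.drop i <;> simp [cpl]

lemma path2cycleA_eq (p1 p2 : List Int) :
    path2cycleA p1 p2 = (dropCommon p1 p2).1 ++ (dropCommon p1 p2).2.reverse := by
  unfold path2cycleA
  rw [dropCommon_eq]
  have h := divLoop_eq p1 p2 (min p1.length p2.length) 0 (by omega)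
  simp only [List.drop_zero, Nat.zero_add] at h
  simp [h]

lemma ofList_append (t u : List (List Int)) :
    PySem.Set.ofList (t ++ u) = u.foldl PySem.Set.add (PySem.Set.ofList t) := by
  rw [PySem.Set.ofList_eq_foldl, PySem.Set.ofList_eq_foldl, List.foldl_append]

lemma fold_main (pt : List (Int × Option (Int × (Int × Int)))) :
    ∀ (cs : List (Int × Int × List (List Int))) (t : List (List Int)),
      PySem.Set.ofList (List.foldl (fun temp c =>
          temp ++ c.2.2.map (fun e => path2cycleA (getPathA pt c.1) (getPathA pt c.2.1) ++ e)) t cs)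
      = List.foldl (fun out c =>
          c.2.2.foldl (fun o e => PySem.Set.add o (path2cycleA (getPathA pt c.1) (getPathA pt c.2.1) ++ e)) out)
          (PySem.Set.ofList t) cs := by
  intro cs
  induction cs with
  | nil => intro t; rfl
  | cons c cs ih =>
    intro t
    simp only [List.foldl_cons]
    rw [ih, ofList_append, List.foldl_map]

-- ===== VERDICT (by name: the statement is the Claim_ definition above) =====
theorem inducedCycles_spec : Claim_equal_inducedCycles := by
  intro pt cyc _ _
  unfold Spec_inducedCycles inducedCycles inducedCycles_alt
  have hcc : ∀ (x y : Int),
      (dropCommon (rootPathB pt x) (rootPathB pt y)).1 ++ (dropCommon (rootPathB pt x) (rootPathB pt y)).2.reverse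
      = path2cycleA (getPathA pt x) (getPathA pt y) := by
    intro x y
    rw [rootPathB_eq, rootPathB_eq, path2cycleA_eq]
  simp only [hcc]
  rw [fold_main]
  rfl
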